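-- pv_equiv track=rewrite | github.com/SOSbeacon/SchoolBeacon-GAE | SOSBeacon/sosbeacon/utils.py | number_encode
-- ===== SOURCE A (Python) =====
-- import string
--
-- ALPHABET = string.ascii_letters + string.digits + '-_$'
--
-- BASE = len(ALPHABET)
--
-- def number_encode(number):
--     s = []
--     while True:
--         number, r = divmod(number, BASE)
--         s.append(ALPHABET[r])
--         if not number:
--             break
--     return ''.join(reversed(s))
-- ===== SOURCE B (Python) =====
-- import string
--
-- ALPHABET = string.ascii_letters + string.digits + '-_$'
--
-- BASE = len(ALPHABET)
--
-- def number_encode(number):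
--     if number < BASE:
--         return ALPHABET[number % BASE]
--     return number_encode(number // BASE) + ALPHABET[number % BASE]
-- ===== Notes on version B (the rewrite author's own statement) =====
-- stated objective: simpler
-- what changed: Replaces the while-loop that appends digits least-significant-first into a list and then reverse-joins with a recursion that emits digits most-significant-first by string concatenation, with no list and no reversal.
import Mathlib
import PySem

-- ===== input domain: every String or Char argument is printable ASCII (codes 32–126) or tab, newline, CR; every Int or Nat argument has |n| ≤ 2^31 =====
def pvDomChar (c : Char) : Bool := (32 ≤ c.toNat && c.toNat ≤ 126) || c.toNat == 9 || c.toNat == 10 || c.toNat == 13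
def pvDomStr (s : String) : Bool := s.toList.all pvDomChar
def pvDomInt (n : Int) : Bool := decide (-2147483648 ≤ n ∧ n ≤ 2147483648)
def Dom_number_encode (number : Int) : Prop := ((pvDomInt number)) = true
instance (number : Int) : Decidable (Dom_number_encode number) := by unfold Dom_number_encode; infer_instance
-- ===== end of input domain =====

-- B replaces A's append-then-reverse digit loop with most-significant-first recursion; return value only.


-- ALPHABET = ascii_letters + digits + '-_$'
def pvAlphabet : List Char :=
  "abcdefghijklmnopqrstuvwxyzABCDEFGHIJKLMNOPQRSTUVWXYZ0123456789-_$".toList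

-- ALPHABET[r]; every use has 0 ≤ r < 65 so the default is never taken
def pvAlphaGet (r : Int) : Char := (PySem.List.pyGet? pvAlphabet r).getD ' '

-- ===== PORT A =====
-- A's while-loop: divmod, append ALPHABET[r], stop when quotient is 0.
-- Under Pre_ (0 ≤ number) Python's divmod agrees with Nat division, so the loop runs on Nat.
def pvALoop (n : Nat) (s : List Char) : List Char :=
  let q := n / 65
  let r := n % 65
  let s' := s ++ [pvAlphaGet (r : Int)]
  if q = 0 then s' else pvALoop q s'
  termination_by n
  decreasing_by exact Nat.div_lt_self (Nat.pos_of_ne_zero (by omega)) (by omega)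

-- the 'number < 0' branch is only a totality guard: Python's loop diverges there (outside Pre_)
def number_encode (number : Int) : String :=
  if number < 0 then "" else String.mk ((pvALoop number.toNat []).reverse)

-- ===== PORT B =====
-- B's recursion, kept on Int exactly as Source B (its base case also fires for negatives)
def pvBRec (n : Int) : List Char :=
  if n < 65 then [pvAlphaGet (PySem.Int.mod n 65)]
  else pvBRec (PySem.Int.floordiv n 65) ++ [pvAlphaGet (PySem.Int.mod n 65)]
  termination_by n.toNat
  decreasing_by
    rename_i h
    have h1 : PySem.Int.floordiv n 65 < n :=
      (PySem.Int.floordiv_lt_iff_lt_mul (by norm_num)).mpr (by nlinarith)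
    have h2 : (0:Int) ≤ PySem.Int.floordiv n 65 :=
      (PySem.Int.le_floordiv_iff_mul_le (by norm_num)).mpr (by omega)
    omega

def number_encode_alt (number : Int) : String := String.mk (pvBRec number)

-- ===== PRECONDITION & SPEC =====
-- Pre_ excludes negative numbers: there A's while-loop never terminates (quotient stays -1).
def Pre_number_encode (number : Int) : Prop := 0 ≤ number
instance (number : Int) : Decidable (Pre_number_encode number) := by unfold Pre_number_encode; infer_instance
def pvWitness_number_encode : Int := (12345)
def Spec_number_encode (number : Int) (out : String) : Prop := out = number_encode_alt number
instance (number : Int) (out : String) : Decidable (Spec_number_encode number out) := by unfold Spec_number_encode; infer_instance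

-- ===== CLAIM (what is proved, stated in full; the proofs are below) =====
def Claim_equal_number_encode : Prop := ∀ (number : Int), Dom_number_encode number → Pre_number_encode number → Spec_number_encode number (number_encode number)

-- ===== LEMMAS AND PROOFS =====

theorem pvALoop_unfold (n : Nat) (s : List Char) :
    pvALoop n s = (if n / 65 = 0 then s ++ [pvAlphaGet ((n % 65 : Nat) : Int)]
      else pvALoop (n / 65) (s ++ [pvAlphaGet ((n % 65 : Nat) : Int)])) := by
  rw [pvALoop]

theorem pvALoop_append (n : Nat) (s : List Char) : pvALoop n s = s ++ pvALoop n [] := by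
  induction n using Nat.strong_induction_on generalizing s with
  | _ n ih =>
    rw [pvALoop_unfold n s, pvALoop_unfold n []]
    by_cases h : n / 65 = 0
    · simp [h]
    · have hlt : n / 65 < n := Nat.div_lt_self (Nat.pos_of_ne_zero (by omega)) (by omega)
      simp only [h, if_neg, not_false_eq_true, ite_false]
      rw [ih (n / 65) hlt, ih (n / 65) hlt ([] ++ [pvAlphaGet ((n % 65 : Nat) : Int)])]
      simp

theorem pvBRec_eq (n : Nat) : pvBRec (n : Int) = (pvALoop n []).reverse := by
  induction n using Nat.strong_induction_on with
  | _ n ih =>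
    rw [pvBRec, pvALoop_unfold]
    have hm : PySem.Int.mod (n : Int) 65 = ((n % 65 : Nat) : Int) := by
      exact_mod_cast PySem.Int.mod_natCast n 65
    have hd : PySem.Int.floordiv (n : Int) 65 = ((n / 65 : Nat) : Int) := by
      exact_mod_cast PySem.Int.floordiv_natCast n 65
    by_cases h : n < 65
    · have hq : n / 65 = 0 := Nat.div_eq_of_lt h
      simp [h, hq, hm]
    · have hq : n / 65 ≠ 0 := by
        intro hz; exact h (Nat.lt_of_div_eq_zero (by omega) hz)
      have hlt : ¬ ((n : Int) < 65) := by exact_mod_cast h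
      simp only [hlt, hq, not_false_eq_true, ite_false, if_neg]
      rw [hm, hd, ih (n / 65) (Nat.div_lt_self (by omega) (by omega)),
          pvALoop_append (n / 65) ([] ++ [pvAlphaGet ((n % 65 : Nat) : Int)])]
      simp

-- ===== VERDICT (by name: the statement is the Claim_ definition above) =====
theorem number_encode_spec : Claim_equal_number_encode := by
  intro number _ hpre
  have h0 : (0:Int) ≤ number := hpre
  have h := pvBRec_eq number.toNat
  rw [Int.toNat_of_nonneg h0] at h
  unfold Spec_number_encode number_encode number_encode_alt
  rw [if_neg (by omega), ← h]
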